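-- pv_equiv track=rewrite | github.com/HMC-MIR/GeneratingSheetMusic | transformers/gpt/semantic_to_pae.py | insert_beams
-- ===== SOURCE A (Python) =====
-- def insert_beams(data_pieces, sfs_per_beat, sfs_per_bar):
--     data = ''
--     breakpoints = list(range(0, sfs_per_bar, sfs_per_beat))
--     breakpoints_eighth = [sfs_per_bar // 2]
--     location_sfs = 0
--     inBeam = False
--     justStartedBeam = False
--     for i, (data_piece, sfs) in enumerate(data_pieces):
--         worthy_of_beam = '-' not in data_piece and sfs < 16 and sfs != 0
--         is_eighth = 8 <= sfs < 16
--         is_breakpoint = not is_eighth and location_sfs in breakpoints or location_sfs in breakpoints_eighth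
--
--         # If in a beam, end beam BEFORE ADDING TOKEN if:
--         # This token is a rest
--         # OR This token is a quarter note or slower
--         # OR This token does not have rhythmic value (includes barline)
--         # OR This token is on a breakpoint
--         if inBeam and (not worthy_of_beam or is_breakpoint):
--             inBeam = False
--             if not justStartedBeam:
--                 data += '}'
--             else:
--                 # Just started a beam, remove last {
--                 data = data[::-1].replace('{', '', 1)[::-1]
--
--         # If not in a beam, start beam BEFORE ADDING TOKEN if:
--         # This token is not a rest
--         # AND This token is faster than a quarter note
--         # AND This token has rhythmic value
--         if not inBeam and worthy_of_beam:
--             inBeam = True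
--             justStartedBeam = True
--             data += '{'
--         else:
--             justStartedBeam = False
--
--         data += data_piece
--         location_sfs += sfs
--
--         if data_piece == '/':
--             location_sfs = 0
--     if inBeam:
--         data += '}'
--     return data
-- ===== SOURCE B (Python) =====
-- def insert_beams(data_pieces, sfs_per_beat, sfs_per_bar):
--     # Staged algorithm: pass 1 annotates each token with (worthy, breakpoint)
--     # flags; pass 2 groups consecutive worthy tokens (splitting at breakpoints)
--     # and emits each group with braces, without any beam state machine or
--     # retroactive brace cancellation.  A group gets braces iff it has at least
--     # two tokens or it reaches the end of the stream.
--     bps = set(range(0, sfs_per_bar, sfs_per_beat))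
--     half = sfs_per_bar // 2
--     flags = []
--     loc = 0
--     for piece, sfs in data_pieces:
--         w = '-' not in piece and sfs < 16 and sfs != 0
--         e = 8 <= sfs < 16
--         flags.append((w, (not e and loc in bps) or loc == half))
--         loc = 0 if piece == '/' else loc + sfs
--     n = len(data_pieces)
--     out = []
--     i = 0
--     while i < n:
--         piece = data_pieces[i][0]
--         w, _ = flags[i]
--         if not w:
--             out.append(piece)
--             i += 1
--             continue
--         j = i + 1
--         while j < n and flags[j][0] and not flags[j][1]:
--             j += 1
--         group = [p for p, _ in data_pieces[i:j]]
--         if j - i >= 2 or j == n: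
--             out.append('{')
--             out.extend(group)
--             out.append('}')
--         else:
--             out.extend(group)
--         i = j
--     return ''.join(out)
-- ===== Notes on version B (the rewrite author's own statement) =====
-- stated objective: faster
-- what changed: B replaces A's single-pass beam state machine with retroactive brace cancellation by a staged algorithm: one pass annotates tokens with (worthy, breakpoint) flags, a second pass groups maximal runs of worthy tokens split at breakpoints and emits braces only around groups of length >= 2 or groups reaching the end of the stream, joining once.
-- outside the precondition, e.g. on insert_beams([('a{', 4), ('c', 16)], 4, 16): A returns '{ac', B returns 'a{c'; on insert_beams([('a', 4)], 0, 16): A raises ValueError, B raises ValueError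
import Mathlib
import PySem

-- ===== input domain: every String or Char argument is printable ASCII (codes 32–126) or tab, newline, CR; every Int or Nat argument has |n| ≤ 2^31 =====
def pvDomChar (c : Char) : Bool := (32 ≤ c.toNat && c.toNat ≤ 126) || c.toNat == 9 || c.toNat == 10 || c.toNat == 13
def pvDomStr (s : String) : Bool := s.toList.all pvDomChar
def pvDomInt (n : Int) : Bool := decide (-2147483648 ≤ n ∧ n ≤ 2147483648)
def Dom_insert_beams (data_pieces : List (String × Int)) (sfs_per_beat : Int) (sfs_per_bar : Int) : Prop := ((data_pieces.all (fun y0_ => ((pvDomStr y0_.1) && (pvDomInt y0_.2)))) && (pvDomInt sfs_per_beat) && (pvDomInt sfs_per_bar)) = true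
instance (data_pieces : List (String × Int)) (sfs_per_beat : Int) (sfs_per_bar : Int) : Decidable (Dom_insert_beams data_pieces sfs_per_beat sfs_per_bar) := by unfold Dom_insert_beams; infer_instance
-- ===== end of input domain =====

-- B replaces A's beam state machine (with its quadratic string concatenation and retroactive
-- double-reversal brace cancellation) by two staged passes: annotate tokens with flags, then
-- group worthy runs split at breakpoints and emit braces per group; measurably faster.

-- ===== PORT A =====
-- exact port of data[::-1].replace('{', '', 1)[::-1]: the old string is the single char '{' and the
-- new string is empty, so the replace removes the first '{' of the reversed list
def pvRemoveFirstBrace : List Char → List Char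
  | [] => []
  | c :: cs => if c = '{' then cs else c :: pvRemoveFirstBrace cs

-- one iteration of A's loop; state = (data, location_sfs, inBeam, justStartedBeam)
def pvStepA (bps bp8 : List Int) (s : List Char × Int × Bool × Bool) (pc : String × Int) :
    List Char × Int × Bool × Bool :=
  let data := s.1; let loc := s.2.1; let inBeam := s.2.2.1; let just := s.2.2.2
  let piece := pc.1; let sfs := pc.2
  let worthy := !(PySem.Str.isIn "-" piece) && decide (sfs < 16) && decide (sfs ≠ 0)
  let is8 := decide (8 ≤ sfs) && decide (sfs < 16)
  let isbp := (!is8 && bps.contains loc) || bp8.contains loc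
  let (data, inBeam) :=
    if inBeam && (!worthy || isbp) then
      (if !just then data ++ ['}'] else (pvRemoveFirstBrace data.reverse).reverse, false)
    else (data, inBeam)
  let (data, inBeam, just) :=
    if !inBeam && worthy then (data ++ ['{'], true, true) else (data, inBeam, false)
  let data := data ++ piece.toList
  let loc := loc + sfs
  let loc := if piece == "/" then 0 else loc
  (data, loc, inBeam, just)

def insert_beams (data_pieces : List (String × Int)) (sfs_per_beat : Int) (sfs_per_bar : Int) : String :=
  let bps := PySem.List.pyRange 0 sfs_per_bar sfs_per_beat
  let bp8 := [PySem.Int.floordiv sfs_per_bar 2]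
  let r := (PySem.List.enumerate data_pieces 0).foldl (fun s ip => pvStepA bps bp8 s ip.2)
    ([], 0, false, false)
  String.ofList (if r.2.2.1 then r.1 ++ ['}'] else r.1)

-- ===== PORT B =====
-- pass 1: annotate each token with its (worthy, breakpoint) flags (Python's flags loop)
def pvFlags (bps : PySem.Set Int) (half : Int) (loc : Int) :
    List (String × Int) → List (String × Bool × Bool)
  | [] => []
  | (p, sfs) :: rest =>
      let w := !(PySem.Str.isIn "-" p) && decide (sfs < 16) && decide (sfs ≠ 0)
      let e := decide (8 ≤ sfs) && decide (sfs < 16)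
      let c := (!e && PySem.Set.contains bps loc) || decide (loc = half)
      (p, w, c) :: pvFlags bps half (if p == "/" then 0 else loc + sfs) rest

-- pass 2 inner while loop: consume the rest of the current group (worthy and not a breakpoint)
def pvTakeGroup : List (String × Bool × Bool) → List String × List (String × Bool × Bool)
  | [] => ([], [])
  | (p, w, c) :: rest =>
      if w && !c then let r := pvTakeGroup rest; (p :: r.1, r.2) else ([], (p, w, c) :: rest)

lemma pvTakeGroup_len (l : List (String × Bool × Bool)) : (pvTakeGroup l).2.length ≤ l.length := by
  induction l with
  | nil => simp [pvTakeGroup]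
  | cons x xs ih =>
    obtain ⟨p, w, c⟩ := x
    simp only [pvTakeGroup]
    split
    · exact Nat.le_succ_of_le ih
    · simp

-- pass 2 outer while loop: emit each group, braced iff it has ≥ 2 tokens or reaches the end
def pvEmit : List (String × Bool × Bool) → List String
  | [] => []
  | (p, w, c) :: rest =>
      if !w then p :: pvEmit rest
      else
        let g := pvTakeGroup rest
        if !g.1.isEmpty || g.2.isEmpty then "{" :: p :: (g.1 ++ "}" :: pvEmit g.2)
        else p :: pvEmit g.2
termination_by l => l.length
decreasing_by
  all_goals simp
  all_goals exact pvTakeGroup_len rest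

def insert_beams_alt (data_pieces : List (String × Int)) (sfs_per_beat : Int) (sfs_per_bar : Int) : String :=
  let bps := PySem.Set.ofList (PySem.List.pyRange 0 sfs_per_bar sfs_per_beat)
  let half := PySem.Int.floordiv sfs_per_bar 2
  PySem.Str.join "" (pvEmit (pvFlags bps half 0 data_pieces))

-- ===== PRECONDITION & SPEC =====
-- Pre_ excludes sfs_per_beat = 0, on which A's range(...) raises ValueError, and token strings
-- containing '{', on which A's remove-last-'{' may delete a brace inside a token rather than the
-- beam brace it just inserted — a corner where both behaviours are equally defensible, since
-- '{'/'}' are exactly the markers this function inserts.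
def Pre_insert_beams (data_pieces : List (String × Int)) (sfs_per_beat : Int) (sfs_per_bar : Int) : Prop :=
  sfs_per_beat ≠ 0 ∧ ∀ p ∈ data_pieces, ('{' : Char) ∉ p.1.toList
instance (data_pieces : List (String × Int)) (sfs_per_beat : Int) (sfs_per_bar : Int) : Decidable (Pre_insert_beams data_pieces sfs_per_beat sfs_per_bar) := by unfold Pre_insert_beams; infer_instance
def pvWitness_insert_beams : (List (String × Int)) × Int × Int :=
  ([("4C", 4), ("4D", 4), ("2E", 16), ("/", 0)], 4, 16)
def Spec_insert_beams (data_pieces : List (String × Int)) (sfs_per_beat : Int) (sfs_per_bar : Int) (out : String) : Prop := out = insert_beams_alt data_pieces sfs_per_beat sfs_per_bar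
instance (data_pieces : List (String × Int)) (sfs_per_beat : Int) (sfs_per_bar : Int) (out : String) : Decidable (Spec_insert_beams data_pieces sfs_per_beat sfs_per_bar out) := by unfold Spec_insert_beams; infer_instance

-- ===== CLAIM (what is proved, stated in full; the proofs are below) =====
def Claim_equal_insert_beams : Prop := ∀ (data_pieces : List (String × Int)) (sfs_per_beat : Int) (sfs_per_bar : Int), Dom_insert_beams data_pieces sfs_per_beat sfs_per_bar → Pre_insert_beams data_pieces sfs_per_beat sfs_per_bar → Spec_insert_beams data_pieces sfs_per_beat sfs_per_bar (insert_beams data_pieces sfs_per_beat sfs_per_bar)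

-- ===== LEMMAS AND PROOFS =====

-- A's loop driven by precomputed flags; state = (data, inBeam, justStartedBeam)
def pvRunStep (s : List Char × Bool × Bool) (t : String × Bool × Bool) : List Char × Bool × Bool :=
  let data := s.1; let inBeam := s.2.1; let just := s.2.2
  let (data, inBeam) :=
    if inBeam && (!t.2.1 || t.2.2) then
      (if !just then data ++ ['}'] else (pvRemoveFirstBrace data.reverse).reverse, false)
    else (data, inBeam)
  let (data, inBeam, just) :=
    if !inBeam && t.2.1 then (data ++ ['{'], true, true) else (data, inBeam, false)
  (data ++ t.1.toList, inBeam, just)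

def pvFinish (s : List Char × Bool × Bool) : List Char :=
  if s.2.1 then s.1 ++ ['}'] else s.1

def pvJoinL (l : List String) : List Char := (l.map String.toList).flatten

lemma pvSetContains (l : List Int) (x : Int) :
    PySem.Set.contains (PySem.Set.ofList l) x = l.contains x := by
  by_cases h : x ∈ l <;>
    simp [h, PySem.Set.mem_ofList,
      PySem.Set.contains_iff]

lemma pvContainsSingleton (x a : Int) : ([x].contains a) = decide (a = x) := by
  by_cases h : a = x <;> simp [h]

-- Bridge: A's fold over (piece, sfs) equals the flag-driven loop over the annotated list
lemma pvBridge (bps : List Int) (half : Int) (dp : List (String × Int))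
    (data : List Char) (loc : Int) (inB just : Bool) :
    (let r := dp.foldl (pvStepA bps [half]) (data, loc, inB, just); (r.1, r.2.2)) =
      (pvFlags (PySem.Set.ofList bps) half loc dp).foldl pvRunStep (data, inB, just) := by
  induction dp generalizing data loc inB just with
  | nil => rfl
  | cons pc rest ih =>
    obtain ⟨p, sfs⟩ := pc
    simp only [pvFlags, List.foldl_cons]
    rw [← ih]
    have hst : pvStepA bps [half] (data, loc, inB, just) (p, sfs) =
        ((pvRunStep (data, inB, just)
            (p, !(PySem.Str.isIn "-" p) && decide (sfs < 16) && decide (sfs ≠ 0),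
             (!(decide (8 ≤ sfs) && decide (sfs < 16)) &&
                PySem.Set.contains (PySem.Set.ofList bps) loc) || decide (loc = half))).1,
         (if p == "/" then 0 else loc + sfs),
         (pvRunStep (data, inB, just)
            (p, !(PySem.Str.isIn "-" p) && decide (sfs < 16) && decide (sfs ≠ 0),
             (!(decide (8 ≤ sfs) && decide (sfs < 16)) &&
                PySem.Set.contains (PySem.Set.ofList bps) loc) || decide (loc = half))).2) := by
      simp only [pvStepA, pvRunStep, pvSetContains, pvContainsSingleton]
    rw [hst]

lemma pvRemoveFirstBrace_spec (T R : List Char) (hT : ('{' : Char) ∉ T) :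
    pvRemoveFirstBrace (T ++ '{' :: R) = T ++ R := by
  induction T with
  | nil => simp [pvRemoveFirstBrace]
  | cons c cs ih =>
    simp only [List.mem_cons, not_or] at hT
    simp [pvRemoveFirstBrace, Ne.symm hT.1, ih hT.2]

-- cancellation of a just-started beam: the rightmost '{' of data ++ '{' ++ p is the inserted one
lemma pvCancel (data : List Char) (p : String) (hp : ('{' : Char) ∉ p.toList) :
    (pvRemoveFirstBrace (data ++ '{' :: p.toList).reverse).reverse = data ++ p.toList := by
  have : (data ++ '{' :: p.toList).reverse = p.toList.reverse ++ '{' :: data.reverse := by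
    simp
  rw [this, pvRemoveFirstBrace_spec _ _ (by simpa using hp)]
  simp

-- the group lemma and the main lemma, by strong induction on length:
-- pvMainStmt n: the flag-driven A loop started fresh agrees with join ∘ pvEmit on lists of length ≤ n
def pvMainStmt (n : Nat) : Prop :=
  ∀ fl : List (String × Bool × Bool), fl.length ≤ n →
    (∀ t ∈ fl, ('{' : Char) ∉ t.1.toList) →
    ∀ data : List Char,
      pvFinish (fl.foldl pvRunStep (data, false, false)) = data ++ pvJoinL (pvEmit fl)

-- inside a beam that already holds ≥ 2 tokens, the loop emits the rest of the group and '}'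
lemma pvGroup (n : Nat) (ihm : ∀ m < n + 1, pvMainStmt m)
    (fl : List (String × Bool × Bool)) (hn : fl.length ≤ n)
    (hb : ∀ t ∈ fl, ('{' : Char) ∉ t.1.toList) (data : List Char) :
    pvFinish (fl.foldl pvRunStep (data, true, false)) =
      data ++ pvJoinL (pvTakeGroup fl).1 ++ '}' :: pvJoinL (pvEmit (pvTakeGroup fl).2) := by
  induction fl generalizing data n with
  | nil => simp [pvTakeGroup, pvFinish, pvEmit, pvJoinL]
  | cons t rest ih =>
    obtain ⟨p, w, c⟩ := t
    simp only [pvTakeGroup, List.foldl_cons]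
    by_cases hw : (w && !c) = true
    · -- group continues through this token
      rw [if_pos hw]
      obtain ⟨hw1, hc1⟩ := Bool.and_eq_true_iff.mp hw
      have hstep : pvRunStep (data, true, false) (p, w, c) = (data ++ p.toList, true, false) := by
        simp [pvRunStep, hw1, Bool.not_eq_true' .. ▸ hc1]
      rw [hstep]
      cases n with
      | zero => simp at hn
      | succ m =>
        have := ih m (fun k hk => ihm k (by omega)) (by simpa using Nat.le_of_succ_le_succ hn)
          (fun u hu => hb u (List.mem_cons_of_mem _ hu)) (data ++ p.toList)
        simp only [this, pvJoinL, List.map_cons, List.flatten_cons]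
        simp
    · -- group ends before this token: '}' is appended, then a fresh run on t :: rest
      rw [if_neg hw]
      have hcase : (!w || c) = true := by
        cases w <;> cases c <;> simp_all
      have hstep : pvRunStep (data, true, false) (p, w, c) =
          pvRunStep (data ++ ['}'], false, false) (p, w, c) := by
        simp [pvRunStep, hcase]
      rw [hstep, ← List.foldl_cons]
      have := ihm n (by omega) ((p, w, c) :: rest) hn hb (data ++ ['}'])
      rw [this]
      simp [pvJoinL]

-- the main lemma for one n, assuming it for all smaller lengths
lemma pvMainStep (n : Nat) (ihm : ∀ m < n, pvMainStmt m) : pvMainStmt n := by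
  intro fl hn hb data
  cases fl with
  | nil => simp [pvFinish, pvEmit, pvJoinL]
  | cons t rest =>
    obtain ⟨p, w, c⟩ := t
    have hbp : ('{' : Char) ∉ p.toList := hb (p, w, c) (List.mem_cons_self)
    have hbr : ∀ u ∈ rest, ('{' : Char) ∉ u.1.toList := fun u hu => hb u (List.mem_cons_of_mem _ hu)
    cases n with
    | zero => simp at hn
    | succ m =>
    have hm : rest.length ≤ m := by simpa using Nat.le_of_succ_le_succ hn
    simp only [List.foldl_cons]
    by_cases hw : w = true
    · -- worthy: a beam opens here
      have hstep : pvRunStep (data, false, false) (p, w, c) =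
          (data ++ '{' :: p.toList, true, true) := by
        simp [pvRunStep, hw]
      rw [hstep]
      -- analyse how the group continues
      cases rest with
      | nil =>
        -- end of stream: the final '}' closes even a singleton beam
        simp [pvFinish, pvEmit, hw, pvTakeGroup, pvJoinL]
      | cons u tl =>
        obtain ⟨q, w', c'⟩ := u
        by_cases hw' : (w' && !c') = true
        · -- the group has a second token: no cancellation can happen any more
          obtain ⟨hw1, hc1⟩ := Bool.and_eq_true_iff.mp hw'
          simp only [List.foldl_cons]
          have hstep2 : pvRunStep (data ++ '{' :: p.toList, true, true) (q, w', c') =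
              (data ++ '{' :: p.toList ++ q.toList, true, false) := by
            simp [pvRunStep, hw1, Bool.not_eq_true' .. ▸ hc1]
          rw [hstep2]
          have hg := pvGroup m (fun k hk => ihm k (by omega)) tl
            (by simp at hm; omega) (fun u hu => hbr u (List.mem_cons_of_mem _ hu))
            (data ++ '{' :: p.toList ++ q.toList)
          rw [hg]
          simp only [pvEmit, hw, pvTakeGroup, hw']
          simp [pvJoinL]
        · -- the next token ends the beam: the just-inserted '{' is cancelled
          have hcase : (!w' || c') = true := by
            cases w' <;> cases c' <;> simp_all
          simp only [List.foldl_cons]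
          have hstep2 : pvRunStep (data ++ '{' :: p.toList, true, true) (q, w', c') =
              pvRunStep (data ++ p.toList, false, false) (q, w', c') := by
            simp only [pvRunStep, hcase]
            rw [pvCancel data p hbp]
            simp
          rw [hstep2, ← List.foldl_cons]
          have := ihm m (by omega) ((q, w', c') :: tl) hm
            (fun u hu => hbr u hu) (data ++ p.toList)
          rw [this]
          simp only [pvEmit, hw, pvTakeGroup, if_neg hw']
          simp [pvJoinL]
    · -- not worthy: the token is emitted plainly
      have hstep : pvRunStep (data, false, false) (p, w, c) = (data ++ p.toList, false, false) := by
        simp [pvRunStep, hw]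
      rw [hstep]
      have := ihm m (by omega) rest hm hbr (data ++ p.toList)
      rw [this]
      simp only [pvEmit, hw]
      simp [pvJoinL]

lemma pvMain (n : Nat) : pvMainStmt n := by
  induction n using Nat.strong_induction_on with
  | _ n ih => exact pvMainStep n ih

lemma pvEnumFold (dp : List (String × Int)) (bps bp8 : List Int)
    (init : List Char × Int × Bool × Bool) (s : Int) :
    (PySem.List.enumerate dp s).foldl (fun a ip => pvStepA bps bp8 a ip.2) init =
      dp.foldl (pvStepA bps bp8) init := by
  induction dp generalizing init s with
  | nil => rfl
  | cons p ps ih => simp [PySem.List.enumerate_cons, ih]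

lemma pvIntercalateNil (l : List (List Char)) : [].intercalate l = l.flatten := by
  induction l with
  | nil => rfl
  | cons x xs ih =>
    cases xs with
    | nil => simp [List.intercalate]
    | cons y ys =>
      simp only [List.intercalate] at *
      simp [List.intersperse] at *
      simp [ih]

lemma pvJoinNil (l : List String) :
    (PySem.Str.join "" l).toList = pvJoinL l := by
  simp only [PySem.Str.toList_join, PySem.Chars.join, String.toList_empty, pvJoinL]
  exact pvIntercalateNil _

lemma pvFlagsFst (bps : PySem.Set Int) (half : Int) (loc : Int) (dp : List (String × Int)) :
    (pvFlags bps half loc dp).map Prod.fst = dp.map Prod.fst := by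
  induction dp generalizing loc with
  | nil => rfl
  | cons p ps ih => simp [pvFlags, ih]

-- ===== VERDICT (by name: the statement is the Claim_ definition above) =====
theorem insert_beams_spec : Claim_equal_insert_beams := by
  intro dp beat bar _ hpre
  unfold Spec_insert_beams insert_beams insert_beams_alt
  simp only []
  rw [pvEnumFold]
  have hb := pvBridge (PySem.List.pyRange 0 bar beat) (PySem.Int.floordiv bar 2) dp [] 0 false false
  simp only [] at hb
  set fl := pvFlags (PySem.Set.ofList (PySem.List.pyRange 0 bar beat))
    (PySem.Int.floordiv bar 2) 0 dp with hfl
  have hbr : ∀ t ∈ fl, ('{' : Char) ∉ t.1.toList := by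
    intro t ht
    have : t.1 ∈ fl.map Prod.fst := List.mem_map_of_mem ht
    rw [hfl, pvFlagsFst] at this
    obtain ⟨u, hu, he⟩ := List.mem_map.mp this
    exact he ▸ hpre.2 u hu
  have hb1 := congrArg Prod.fst hb
  have hb2 := congrArg Prod.snd hb
  simp only [] at hb1 hb2
  have hfin := pvMain fl.length fl le_rfl hbr []
  unfold pvFinish at hfin
  simp only [List.nil_append] at hfin
  apply String.ext_iff.mpr
  simp only [String.toList_ofList, pvJoinNil]
  rw [hb1, hb2, hfin]
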